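-- pv_equiv track=rewrite | github.com/SquareKnight/onb-math | solutions/euler036.py | attempt_1
-- ===== SOURCE A (Python) =====
-- def attempt_1(limit):
--     r = 0
--     for i in range(1, limit, 2):
--         str_i = str(i)
--         if str_i == str_i[::-1]:
--             bin_i = bin(i)[2::]
--             if bin_i == bin_i[::-1]:
--                 r += i
--     return r
-- ===== SOURCE B (Python) =====
-- def attempt_1(limit):
--     def rev(n, base):
--         r = 0
--         while n > 0:
--             r = r * base + n % base
--             n //= base
--         return r
--     total = 0
--     i = limit - 1 if limit % 2 == 0 else limit - 2
--     while i >= 1: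
--         if rev(i, 2) == i and rev(i, 10) == i:
--             total += i
--         i -= 2
--     return total
-- ===== Notes on version B (the rewrite author's own statement) =====
-- stated objective: alternative
-- what changed: B scans the odd candidates downward from limit-1/limit-2 and tests palindromicity by arithmetic digit reversal in base 2 and base 10 (binary test first), instead of A's upward range scan comparing str(i) and bin(i) with their reversed slices.
import Mathlib
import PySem

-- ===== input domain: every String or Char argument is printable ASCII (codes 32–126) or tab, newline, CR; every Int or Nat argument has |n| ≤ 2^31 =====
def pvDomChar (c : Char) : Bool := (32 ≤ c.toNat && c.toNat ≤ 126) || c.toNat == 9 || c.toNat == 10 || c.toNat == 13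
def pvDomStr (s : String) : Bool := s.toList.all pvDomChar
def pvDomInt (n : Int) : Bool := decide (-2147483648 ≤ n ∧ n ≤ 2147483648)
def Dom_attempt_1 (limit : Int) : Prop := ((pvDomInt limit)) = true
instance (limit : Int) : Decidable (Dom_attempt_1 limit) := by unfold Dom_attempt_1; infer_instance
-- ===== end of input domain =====

-- B replaces A's upward scan with string-palindrome tests by a downward scan with arithmetic
-- digit reversal (no string conversions): an alternative decomposition, same exact results.

-- ===== PORT A =====
-- literal port of A: for i in range(1, limit, 2): decimal/binary string palindrome tests, r += i
-- (str_i[::-1] is PySem.List.slice?; bin(i) is PySem.Int.toBinChars0b, [2::] a slice from 2)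
def attempt_1 (limit : Int) : Int :=
  (PySem.List.pyRange 1 limit 2).foldl
    (fun r i =>
      let str_i := PySem.Int.toChars i
      if some str_i = PySem.List.slice? str_i none none (-1) then
        let bin_i := PySem.List.slice (PySem.Int.toBinChars0b i) (some 2) none
        if some bin_i = PySem.List.slice? bin_i none none (-1) then r + i else r
      else r)
    0

-- ===== PORT B =====
-- helper rev(n, base) of Source B: reverse the base-`base` digits of n arithmetically.
-- The '2 ≤ base' conjunct in the guard only makes the recursion total; B calls it with base 2 and 10.
def pvRev (n : Int) (base : Int) (r : Int) : Int :=
  if h : 0 < n ∧ 2 ≤ base then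
    pvRev (PySem.Int.floordiv n base) base (r * base + PySem.Int.mod n base)
  else r
termination_by n.toNat
decreasing_by
  have h1 := h.1
  have hstrict : PySem.Int.floordiv n base < n :=
    (PySem.Int.floordiv_lt_iff_lt_mul (by omega : (0:Int) < base)).mpr (by nlinarith [h.1, h.2])
  omega

-- the while loop of Source B, scanning the odd numbers downward
def pvDownLoop (total : Int) (i : Int) : Int :=
  if h : 1 ≤ i then
    pvDownLoop (if pvRev i 2 0 = i ∧ pvRev i 10 0 = i then total + i else total) (i - 2)
  else total
termination_by i.toNat
decreasing_by omega

def attempt_1_alt (limit : Int) : Int :=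
  pvDownLoop 0 (if PySem.Int.mod limit 2 = 0 then limit - 1 else limit - 2)

-- ===== PRECONDITION & SPEC =====
def Spec_attempt_1 (limit : Int) (out : Int) : Prop := out = attempt_1_alt limit
instance (limit : Int) (out : Int) : Decidable (Spec_attempt_1 limit out) := by
  unfold Spec_attempt_1; infer_instance

-- ===== CLAIM (what is proved, stated in full; the proofs are below) =====
def Claim_equal_attempt_1 : Prop := ∀ (limit : Int), Dom_attempt_1 limit → Spec_attempt_1 limit (attempt_1 limit)

-- ===== LEMMAS AND PROOFS =====

-- A's loop body, named for the proofs (definitionally the lambda inside attempt_1)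
def pvBodyA (r i : Int) : Int :=
  let str_i := PySem.Int.toChars i
  if some str_i = PySem.List.slice? str_i none none (-1) then
    let bin_i := PySem.List.slice (PySem.Int.toBinChars0b i) (some 2) none
    if some bin_i = PySem.List.slice? bin_i none none (-1) then r + i else r
  else r

-- B's contribution of the odd number i
def pvTerm (i : Int) : Int := if pvRev i 2 0 = i ∧ pvRev i 10 0 = i then i else 0

-- sum of the contributions of the first k odd numbers
def pvS (k : Nat) : Int := ((List.range k).map (fun j => pvTerm (2 * (j : Int) + 1))).sum

-- Nat.toDigits renders the reversed digit list through Nat.digitChar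
lemma pv_toDigitsCore_eq (b : Nat) (hb : 2 ≤ b) :
    ∀ (fuel n : Nat) (acc : List Char), n < fuel → 1 ≤ n →
      Nat.toDigitsCore b fuel n acc = ((Nat.digits b n).map Nat.digitChar).reverse ++ acc := by
  intro fuel
  induction fuel with
  | zero => intro n acc h _; omega
  | succ f ih =>
    intro n acc hlt hn
    simp only [Nat.toDigitsCore]
    by_cases hx : n / b = 0
    · rw [if_pos hx, Nat.digits_def' (by omega : 1 < b) (by omega : 0 < n), hx]
      simp
    · rw [if_neg hx]
      have hdn : n / b < n := Nat.div_lt_self (by omega) (by omega)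
      have hpos : 1 ≤ n / b := Nat.pos_of_ne_zero hx
      rw [ih (n / b) _ (lt_of_lt_of_le hdn (Nat.lt_succ_iff.mp hlt)) hpos]
      rw [Nat.digits_def' (by omega : 1 < b) (by omega : 0 < n)]
      simp

lemma pv_toDigits_eq (b n : Nat) (hb : 2 ≤ b) (hn : 1 ≤ n) :
    Nat.toDigits b n = ((Nat.digits b n).map Nat.digitChar).reverse := by
  unfold Nat.toDigits
  rw [pv_toDigitsCore_eq b hb (n + 1) n [] (by omega) hn]
  simp

lemma pv_digitChar_inj : ∀ a < 16, ∀ b < 16, Nat.digitChar a = Nat.digitChar b → a = b := by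
  decide

lemma pv_map_digitChar_cancel : ∀ (L1 L2 : List Nat), (∀ x ∈ L1, x < 16) → (∀ x ∈ L2, x < 16) →
    L1.map Nat.digitChar = L2.map Nat.digitChar → L1 = L2 := by
  intro L1
  induction L1 with
  | nil => intro L2 _ _ h; cases L2 <;> simp_all
  | cons a t ih =>
    intro L2 h1 h2 h
    cases L2 with
    | nil => simp_all
    | cons b u =>
      simp only [List.map_cons, List.cons.injEq] at h
      have ha := pv_digitChar_inj a (h1 a (by simp)) b (h2 b (by simp)) h.1
      have ht := ih u (fun x hx => h1 x (by simp [hx])) (fun x hx => h2 x (by simp [hx])) h.2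
      simp [ha, ht]

lemma pv_map_eq_reverse_iff (L : List Nat) (h : ∀ x ∈ L, x < 16) :
    (L.map Nat.digitChar).reverse = L.map Nat.digitChar ↔ L.reverse = L := by
  constructor
  · intro he
    rw [← List.map_reverse] at he
    exact pv_map_digitChar_cancel _ _ (fun x hx => h x (List.mem_reverse.mp hx)) h he
  · intro he
    rw [← List.map_reverse, he]

-- pvRev computes ofDigits of the reversed digit list
lemma pv_pvRev_eq (b : Nat) (hb : 2 ≤ b) : ∀ (m : Nat) (r : Int),
    pvRev (m : Int) (b : Int) r =
      r * (b : Int) ^ (Nat.digits b m).length + ((Nat.ofDigits b (Nat.digits b m).reverse : Nat) : Int) := by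
  intro m
  induction m using Nat.strong_induction_on with
  | _ m ih =>
    intro r
    rw [pvRev]
    by_cases hm : 0 < m
    · rw [dif_pos ⟨by exact_mod_cast hm, by exact_mod_cast hb⟩]
      rw [PySem.Int.floordiv_natCast, PySem.Int.mod_natCast]
      rw [ih (m / b) (Nat.div_lt_self hm (by omega)) _]
      rw [Nat.digits_def' (by omega : 1 < b) hm]
      rw [List.reverse_cons, Nat.ofDigits_append, Nat.ofDigits_singleton]
      push_cast
      simp only [List.length_cons, List.length_reverse]
      ring
    · rw [dif_neg (by intro hc; exact hm (by exact_mod_cast hc.1))]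
      have hz : m = 0 := by omega
      subst hz
      simp

lemma pv_pvRev_self_iff (b : Nat) (hb : 2 ≤ b) (m : Nat) (hm : 1 ≤ m) (hd : m % b ≠ 0) :
    pvRev (m : Int) (b : Int) 0 = (m : Int) ↔ (Nat.digits b m).reverse = Nat.digits b m := by
  rw [pv_pvRev_eq b hb m 0, zero_mul, zero_add, Nat.cast_inj]
  constructor
  · intro he
    have hlt : ∀ l ∈ (Nat.digits b m).reverse, l < b := fun l hl =>
      Nat.digits_lt_base (by omega) (List.mem_reverse.mp hl)
    have hd' : Nat.digits b m = m % b :: Nat.digits b (m / b) :=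
      Nat.digits_def' (by omega : 1 < b) (by omega)
    have hlast : ∀ h : (Nat.digits b m).reverse ≠ [], (Nat.digits b m).reverse.getLast h ≠ 0 := by
      intro h
      rw [List.getLast_reverse]
      simp [hd', hd]
    have h2 := Nat.digits_ofDigits b (by omega) (Nat.digits b m).reverse hlt hlast
    rw [he] at h2
    exact h2.symm
  · intro he
    rw [he, Nat.ofDigits_digits]

lemma pv_rev10_iff (m : Nat) (hm : 1 ≤ m) (hd : m % 10 ≠ 0) :
    pvRev (m : Int) 10 0 = (m : Int) ↔ (Nat.digits 10 m).reverse = Nat.digits 10 m := by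
  have h := pv_pvRev_self_iff 10 (by omega) m hm hd
  simpa using h

lemma pv_rev2_iff (m : Nat) (hm : 1 ≤ m) (hd : m % 2 ≠ 0) :
    pvRev (m : Int) 2 0 = (m : Int) ↔ (Nat.digits 2 m).reverse = Nat.digits 2 m := by
  have h := pv_pvRev_self_iff 2 (by omega) m hm hd
  simpa using h

lemma pv_bodyA_eq (m : Nat) (hm : m % 2 = 1) (r : Int) :
    pvBodyA r (m : Int) = r + pvTerm (m : Int) := by
  have hm1 : 1 ≤ m := by omega
  have h10 : m % 10 ≠ 0 := by omega
  have hchars : PySem.Int.toChars (m : Int) = ((Nat.digits 10 m).map Nat.digitChar).reverse := by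
    simp only [PySem.Int.toChars, if_neg (by omega : ¬ ((m : Int) < 0)), Int.toNat_natCast]
    exact pv_toDigits_eq 10 m (by omega) hm1
  have hbin : PySem.List.slice (PySem.Int.toBinChars0b (m : Int)) (some 2) none
      = ((Nat.digits 2 m).map Nat.digitChar).reverse := by
    simp only [PySem.Int.toBinChars0b, if_neg (by omega : ¬ ((m : Int) < 0)), Int.toNat_natCast]
    rw [pv_toDigits_eq 2 m (by omega) hm1, PySem.List.slice_from _ (by omega : (0:Int) ≤ 2)]
    rfl
  have hd10 : ∀ x ∈ Nat.digits 10 m, x < 16 := fun x hx => by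
    have := Nat.digits_lt_base (by omega) hx; omega
  have hd2 : ∀ x ∈ Nat.digits 2 m, x < 16 := fun x hx => by
    have := Nat.digits_lt_base (by omega) hx; omega
  have hc1 : (some (PySem.Int.toChars (m : Int)) =
      PySem.List.slice? (PySem.Int.toChars (m : Int)) none none (-1)) ↔
      pvRev (m : Int) 10 0 = (m : Int) := by
    rw [PySem.List.slice?_none_none_neg_one, hchars]
    simp only [Option.some.injEq, List.reverse_reverse]
    rw [pv_map_eq_reverse_iff _ hd10]
    exact (pv_rev10_iff m hm1 h10).symm
  have hc2 : (some (PySem.List.slice (PySem.Int.toBinChars0b (m : Int)) (some 2) none) =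
      PySem.List.slice? (PySem.List.slice (PySem.Int.toBinChars0b (m : Int)) (some 2) none) none none (-1)) ↔
      pvRev (m : Int) 2 0 = (m : Int) := by
    rw [PySem.List.slice?_none_none_neg_one, hbin]
    simp only [Option.some.injEq, List.reverse_reverse]
    rw [pv_map_eq_reverse_iff _ hd2]
    exact (pv_rev2_iff m hm1 (by omega)).symm
  by_cases p10 : pvRev (m : Int) 10 0 = (m : Int) <;>
    by_cases p2 : pvRev (m : Int) 2 0 = (m : Int) <;>
      simp only [pvBodyA, pvTerm] <;>
        simp [hc1, hc2, p10, p2]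

lemma pv_foldA : ∀ (K : Nat) (r : Int),
    ((List.range K).map (fun k : Nat => (1 : Int) + 2 * (k : Int))).foldl pvBodyA r = r + pvS K := by
  intro K
  induction K with
  | zero => intro r; simp [pvS]
  | succ k ih =>
    intro r
    rw [List.range_succ, List.map_append, List.foldl_append, ih]
    have hx : (1 : Int) + 2 * (k : Int) = ((2 * k + 1 : Nat) : Int) := by push_cast; ring
    simp only [List.map_cons, List.map_nil, List.foldl_cons, List.foldl_nil]
    rw [hx, pv_bodyA_eq (2 * k + 1) (by omega)]
    have hS : pvS (k + 1) = pvS k + pvTerm (2 * (k : Int) + 1) := by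
      simp [pvS, List.range_succ]
    have hy : ((2 * k + 1 : Nat) : Int) = 2 * (k : Int) + 1 := by push_cast; ring
    rw [hy, hS]
    omega

lemma pv_foldB : ∀ (j : Nat) (total : Int),
    pvDownLoop total (2 * (j : Int) - 1) = total + pvS j := by
  intro j
  induction j with
  | zero =>
    intro total
    rw [pvDownLoop, dif_neg (by omega)]
    simp [pvS]
  | succ k ih =>
    intro total
    rw [pvDownLoop, dif_pos (by push_cast; omega)]
    have h1 : 2 * ((k + 1 : Nat) : Int) - 1 - 2 = 2 * (k : Int) - 1 := by push_cast; ring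
    have h2 : 2 * ((k + 1 : Nat) : Int) - 1 = 2 * (k : Int) + 1 := by push_cast; ring
    rw [h1, ih, h2]
    have hS : pvS (k + 1) = pvS k + pvTerm (2 * (k : Int) + 1) := by
      simp [pvS, List.range_succ]
    rw [hS]
    simp only [pvTerm]
    split_ifs <;> omega

lemma pv_A_eq (limit : Int) :
    attempt_1 limit = pvS (if 1 < limit then ((limit - 1 + 2 - 1) / 2).toNat else 0) := by
  show (PySem.List.pyRange 1 limit 2).foldl pvBodyA 0 = _
  rw [PySem.List.pyRange_of_pos 1 limit (by omega : (0:Int) < 2)]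
  rw [pv_foldA _ 0, zero_add]

-- ===== VERDICT (by name: the statement is the Claim_ definition above) =====
theorem attempt_1_spec : Claim_equal_attempt_1 := by
  unfold Claim_equal_attempt_1 Spec_attempt_1
  intro limit _
  have hA := pv_A_eq limit
  show attempt_1 limit = attempt_1_alt limit
  unfold attempt_1_alt
  by_cases hl : 1 < limit
  · rw [if_pos hl] at hA
    rw [PySem.Int.mod_eq_emod_of_pos (by omega : (0:Int) < 2)]
    by_cases hp : limit % 2 = 0
    · rw [if_pos hp]
      have hs : limit - 1 = 2 * (((limit - 1 + 2 - 1) / 2).toNat : Int) - 1 := by omega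
      rw [hs, pv_foldB, zero_add, hA]
    · rw [if_neg hp]
      have hs : limit - 2 = 2 * (((limit - 1 + 2 - 1) / 2).toNat : Int) - 1 := by omega
      rw [hs, pv_foldB, zero_add, hA]
  · rw [if_neg hl] at hA
    have h0 : pvS 0 = 0 := by simp [pvS]
    rw [hA, h0]
    split_ifs with h
    · rw [pvDownLoop, dif_neg (by omega)]
    · rw [pvDownLoop, dif_neg (by omega)]
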